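-- pv_equiv track=rewrite | github.com/antoinemadec/test | python/codewars/simpler_interactive_interpreter/simpler_interactive_interpreter.py | find_first_exp_op_exp
-- ===== SOURCE A (Python) =====
-- def find_first_exp_op_exp(e):
--     for i, token in enumerate(e):
--         if token in ('*', '/', '%'):
--             return (i-1, i+1)
--     for i, token in enumerate(e):
--         if token in ('+', '-'):
--             return (i-1, i+1)
--     raise Exception('ERROR')
-- ===== SOURCE B (Python) =====
-- def find_first_exp_op_exp(e):
--     low = None
--     for i, token in enumerate(e):
--         if token in ('*', '/', '%'):
--             return (i-1, i+1)
--         if low is None and token in ('+', '-'):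
--             low = i
--     if low is not None:
--         return (low-1, low+1)
--     raise Exception('ERROR')
-- ===== Notes on version B (the rewrite author's own statement) =====
-- stated objective: alternative
-- what changed: Replaces A's two sequential scans (high-priority ops first, then low-priority ops) by a single pass that returns immediately on a high-priority operator while remembering the first low-priority operator index as a fallback.
import Mathlib
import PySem

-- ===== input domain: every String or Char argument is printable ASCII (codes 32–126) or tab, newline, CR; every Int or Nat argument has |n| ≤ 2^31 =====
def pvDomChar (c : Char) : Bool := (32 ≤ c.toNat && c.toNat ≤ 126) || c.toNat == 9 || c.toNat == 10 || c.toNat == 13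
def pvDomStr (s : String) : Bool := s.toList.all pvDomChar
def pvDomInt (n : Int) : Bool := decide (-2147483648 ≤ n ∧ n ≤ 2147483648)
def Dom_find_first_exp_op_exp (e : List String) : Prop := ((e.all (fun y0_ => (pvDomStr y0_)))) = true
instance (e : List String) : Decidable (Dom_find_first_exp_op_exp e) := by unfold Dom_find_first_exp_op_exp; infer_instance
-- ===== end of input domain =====

-- ===== PORT A =====
-- A's first loop: scan for the first '*'/'/'/'%' token, returning (i-1, i+1).
def ffA_high : List String → Int → Option (Int × Int)
  | [], _ => none
  | t :: ts, i => if t = "*" ∨ t = "/" ∨ t = "%" then some (i - 1, i + 1) else ffA_high ts (i + 1)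

-- A's second loop: scan for the first '+'/'-' token, returning (i-1, i+1).
def ffA_low : List String → Int → Option (Int × Int)
  | [], _ => none
  | t :: ts, i => if t = "+" ∨ t = "-" then some (i - 1, i + 1) else ffA_low ts (i + 1)

-- the final 'raise Exception' is excluded by Pre_; (0, 0) stands for the raise.
def find_first_exp_op_exp (e : List String) : Int × Int :=
  match ffA_high e 0 with
  | some p => p
  | none =>
    match ffA_low e 0 with
    | some p => p
    | none => (0, 0)

-- ===== PORT B =====
-- B's single loop: return at a high-priority operator, remember the first low-priority index.
def ffB : List String → Int → Option Int → Int × Int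
  | [], _, low =>
    match low with
    | some j => (j - 1, j + 1)
    | none => (0, 0)  -- the raise, excluded by Pre_
  | t :: ts, i, low =>
    if t = "*" ∨ t = "/" ∨ t = "%" then (i - 1, i + 1)
    else ffB ts (i + 1) (if low = none ∧ (t = "+" ∨ t = "-") then some i else low)

def find_first_exp_op_exp_alt (e : List String) : Int × Int := ffB e 0 none

-- ===== PRECONDITION & SPEC =====
-- A raises Exception('ERROR') when the list contains none of the five operator tokens; Pre_ excludes exactly those inputs.
def Pre_find_first_exp_op_exp (e : List String) : Prop :=
  (e.any (fun t => t = "*" || t = "/" || t = "%" || t = "+" || t = "-")) = true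
instance (e : List String) : Decidable (Pre_find_first_exp_op_exp e) := by unfold Pre_find_first_exp_op_exp; infer_instance

def pvWitness_find_first_exp_op_exp : List String := ["1", "+", "2", "*", "3"]

def Spec_find_first_exp_op_exp (e : List String) (out : Int × Int) : Prop := out = find_first_exp_op_exp_alt e
instance (e : List String) (out : Int × Int) : Decidable (Spec_find_first_exp_op_exp e out) := by unfold Spec_find_first_exp_op_exp; infer_instance

-- ===== CLAIM (what is proved, stated in full; the proofs are below) =====
def Claim_equal_find_first_exp_op_exp : Prop := ∀ (e : List String), Dom_find_first_exp_op_exp e → Pre_find_first_exp_op_exp e → Spec_find_first_exp_op_exp e (find_first_exp_op_exp e)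

-- ===== LEMMAS AND PROOFS =====
-- B's single pass computes: first-high result if any, else the recorded/first low, else (0,0).
theorem ffB_char (e : List String) : ∀ (i : Int) (low : Option Int),
    ffB e i low =
      match ffA_high e i with
      | some p => p
      | none =>
        match low with
        | some j => (j - 1, j + 1)
        | none =>
          match ffA_low e i with
          | some p => p
          | none => (0, 0) := by
  induction e with
  | nil => intro i low; simp [ffB, ffA_high, ffA_low]
  | cons t ts ih =>
    intro i low
    by_cases hh : t = "*" ∨ t = "/" ∨ t = "%"
    · simp [ffB, ffA_high, hh]
    · have hA : ffA_high (t :: ts) i = ffA_high ts (i + 1) := by simp [ffA_high, hh]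
      by_cases hl : t = "+" ∨ t = "-"
      · cases low with
        | none =>
          simp only [ffB, if_neg hh, ih]
          simp [hA, ffA_low, hl]
        | some j =>
          simp only [ffB, if_neg hh, ih]
          simp [hA]
      · have hB : (if low = none ∧ (t = "+" ∨ t = "-") then some i else low) = low := by
          simp [hl]
        simp only [ffB, if_neg hh, hB, ih]
        have hL : ffA_low (t :: ts) i = ffA_low ts (i + 1) := by simp [ffA_low, hl]
        simp [hA, hL]

-- ===== VERDICT (by name: the statement is the Claim_ definition above) =====
theorem find_first_exp_op_exp_spec : Claim_equal_find_first_exp_op_exp := by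
  intro e _ _
  show find_first_exp_op_exp e = find_first_exp_op_exp_alt e
  rw [find_first_exp_op_exp_alt, ffB_char, find_first_exp_op_exp]
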